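-- pv_equiv track=rewrite | github.com/Igor961-bot/SoundAnalysis1 | audio_features.py | merge_short_middle_non_silence_runs
-- ===== SOURCE A (Python) =====
-- def merge_short_middle_non_silence_runs(labels: list[str], max_run_length: int) -> list[str]:
--     if not labels or max_run_length <= 0:
--         return labels
--
--     cleaned_labels = labels[:]
--     start_index = 0
--
--     while start_index < len(cleaned_labels):
--         end_index = start_index + 1
--         while end_index < len(cleaned_labels) and cleaned_labels[end_index] == cleaned_labels[start_index]:
--             end_index += 1
--
--         run_label = cleaned_labels[start_index]
--         run_length = end_index - start_index
--         left_label = cleaned_labels[start_index - 1] if start_index > 0 else None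
--         right_label = cleaned_labels[end_index] if end_index < len(cleaned_labels) else None
--
--         if (
--             run_label != "silence"
--             and run_length <= max_run_length
--             and left_label is not None
--             and left_label == right_label
--             and left_label != "silence"
--         ):
--             for index in range(start_index, end_index):
--                 cleaned_labels[index] = left_label
--
--         start_index = end_index
--
--     return cleaned_labels
-- ===== SOURCE B (Python) =====
-- def merge_short_middle_non_silence_runs(labels: list[str], max_run_length: int) -> list[str]:
--     if not labels or max_run_length <= 0:
--         return labels
--
--     # One pass: compress into (label, length) runs.
--     runs = []
--     for lab in labels:
--         if runs and runs[-1][0] == lab: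
--             runs[-1][1] += 1
--         else:
--             runs.append([lab, 1])
--
--     # Second pass over runs, carrying the previous run's effective label.
--     out = []
--     prev = None
--     for i, (lab, n) in enumerate(runs):
--         right = runs[i + 1][0] if i + 1 < len(runs) else None
--         if (
--             lab != "silence"
--             and n <= max_run_length
--             and prev is not None
--             and prev == right
--             and prev != "silence"
--         ):
--             eff = prev
--         else:
--             eff = lab
--         out.extend([eff] * n)
--         prev = eff
--     return out
-- ===== Notes on version B (the rewrite author's own statement) =====
-- stated objective: idiomatic
-- what changed: A rewrites short middle runs in place in a copy of the list with nested index-based while loops; B first compresses the labels into (label, length) runs, then makes one pass over the runs carrying the previous run's effective label and rebuilds the output by expanding each run.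
import Mathlib
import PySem

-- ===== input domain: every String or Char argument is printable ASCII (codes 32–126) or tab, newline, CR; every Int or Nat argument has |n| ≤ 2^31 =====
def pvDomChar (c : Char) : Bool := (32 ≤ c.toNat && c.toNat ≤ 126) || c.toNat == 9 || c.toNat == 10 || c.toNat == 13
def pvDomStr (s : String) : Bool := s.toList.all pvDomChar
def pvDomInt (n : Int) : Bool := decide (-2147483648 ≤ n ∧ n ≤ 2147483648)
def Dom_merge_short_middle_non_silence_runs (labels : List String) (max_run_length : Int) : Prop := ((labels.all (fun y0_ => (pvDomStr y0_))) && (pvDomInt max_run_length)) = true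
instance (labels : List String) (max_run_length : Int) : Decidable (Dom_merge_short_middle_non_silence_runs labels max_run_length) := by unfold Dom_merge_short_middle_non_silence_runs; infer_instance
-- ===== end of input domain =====

-- B replaces A's in-place index-juggling rewrite with a run-length-encoding pass followed by a
-- single pass over the runs carrying the previous run's effective label (objective: simpler).

-- ===== PORT A =====
-- inner while loop: advance end_index while cleaned_labels[end_index] == run label
def findRunEnd (xs : List String) (lab : String) (e : Nat) : Nat :=
  if _h : e < xs.length then
    if xs.getD e "" == lab then findRunEnd xs lab (e + 1) else e
  else e
termination_by xs.length - e

-- `for index in range(start_index, end_index): cleaned_labels[index] = left_label`, n = e - s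
def setRange (xs : List String) (s : Nat) (n : Nat) (v : String) : List String :=
  match n with
  | 0 => xs
  | m + 1 => setRange (xs.set s v) (s + 1) m v

theorem setRange_length (xs : List String) (s n : Nat) (v : String) :
    (setRange xs s n v).length = xs.length := by
  induction n generalizing xs s with
  | zero => rfl
  | succ m ih => simp [setRange, ih]

theorem findRunEnd_ge (xs : List String) (lab : String) (e : Nat) :
    e ≤ findRunEnd xs lab e := by
  fun_induction findRunEnd <;> omega

-- outer while loop of A (start_index = s), mutating the list copy
def loopA (mx : Int) (xs : List String) (s : Nat) : List String :=
  if h : s < xs.length then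
    let e := findRunEnd xs (xs.getD s "") (s + 1)
    let runLabel := xs.getD s ""
    let left : Option String := if s > 0 then some (xs.getD (s - 1) "") else none
    let right : Option String := if e < xs.length then some (xs.getD e "") else none
    let cond := runLabel != "silence" && decide ((e : Int) - (s : Int) ≤ mx) &&
      left.isSome && left == right && left != some "silence"
    let xs' := if cond then setRange xs s (e - s) (left.getD "") else xs
    loopA mx xs' e
  else xs
termination_by xs.length - s
decreasing_by
  have h1 : s + 1 ≤ findRunEnd xs (xs.getD s "") (s + 1) := findRunEnd_ge _ _ _
  split_ifs <;> first | (rw [setRange_length]; omega) | omega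

def merge_short_middle_non_silence_runs (labels : List String) (max_run_length : Int) : List String :=
  if labels.isEmpty || max_run_length ≤ 0 then labels
  else loopA max_run_length labels 0

-- ===== PORT B =====
-- first pass of B: compress labels into (label, length) runs; runs kept reversed while building
def buildRunsRev : List String → List (String × Nat) → List (String × Nat)
  | [], acc => acc
  | lab :: rest, acc =>
    match acc with
    | (l, n) :: tl => if l == lab then buildRunsRev rest ((l, n + 1) :: tl)
                      else buildRunsRev rest ((lab, 1) :: (l, n) :: tl)
    | [] => buildRunsRev rest [(lab, 1)]

-- second pass of B: `right` is the next run's label, `prev` the previous run's effective label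
def expandRuns (mx : Int) : List (String × Nat) → Option String → List String
  | [], _ => []
  | (lab, n) :: rest, prev =>
    let right : Option String := rest.head?.map (·.1)
    let cond := lab != "silence" && decide ((n : Int) ≤ mx) &&
      prev.isSome && prev == right && prev != some "silence"
    let eff := if cond then prev.getD lab else lab
    List.replicate n eff ++ expandRuns mx rest (some eff)

def merge_short_middle_non_silence_runs_alt (labels : List String) (max_run_length : Int) : List String :=
  if labels.isEmpty || max_run_length ≤ 0 then labels
  else expandRuns max_run_length ((buildRunsRev labels []).reverse) none

-- ===== PRECONDITION & SPEC =====
def Spec_merge_short_middle_non_silence_runs (labels : List String) (max_run_length : Int) (out : List String) : Prop := out = merge_short_middle_non_silence_runs_alt labels max_run_length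
instance (labels : List String) (max_run_length : Int) (out : List String) : Decidable (Spec_merge_short_middle_non_silence_runs labels max_run_length out) := by unfold Spec_merge_short_middle_non_silence_runs; infer_instance

-- ===== CLAIM (what is proved, stated in full; the proofs are below) =====
def Claim_equal_merge_short_middle_non_silence_runs : Prop := ∀ (labels : List String) (max_run_length : Int), Dom_merge_short_middle_non_silence_runs labels max_run_length → Spec_merge_short_middle_non_silence_runs labels max_run_length (merge_short_middle_non_silence_runs labels max_run_length)

-- ===== LEMMAS AND PROOFS =====

-- canonical left-to-right run compression, used only by the proofs
def absorb (lab : String) (n : Nat) : List (String × Nat) → List (String × Nat)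
  | (l, m) :: tl => if l = lab then (lab, n + m) :: tl else (lab, n) :: (l, m) :: tl
  | [] => [(lab, n)]

def runsC : List String → List (String × Nat)
  | [] => []
  | x :: rest => absorb x 1 (runsC rest)

def leadCount (lab : String) (xs : List String) : Nat := (xs.takeWhile (· == lab)).length

theorem buildRunsRev_absorb (rest : List String) (l : String) (n : Nat) (tl : List (String × Nat)) :
    buildRunsRev rest ((l, n) :: tl) = (absorb l n (runsC rest)).reverse ++ tl := by
  induction rest generalizing l n tl with
  | nil => simp [buildRunsRev, runsC, absorb]
  | cons x rest ih =>
    simp only [buildRunsRev, runsC]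
    by_cases hx : l = x
    · subst hx
      rw [if_pos (by simp), ih]
      cases hr : runsC rest with
      | nil => simp [absorb]
      | cons p tl' =>
        obtain ⟨l', m⟩ := p
        by_cases hl : l' = l <;> simp [absorb, hl] <;> ring_nf
    · rw [if_neg (by simp [hx]), ih]
      have hx' : x ≠ l := Ne.symm hx
      have habs : absorb l n (absorb x 1 (runsC rest)) = (l, n) :: absorb x 1 (runsC rest) := by
        cases hr : runsC rest with
        | nil => simp [absorb, hx']
        | cons p tl' =>
          obtain ⟨l', m⟩ := p
          by_cases hl : l' = x <;> simp [absorb, hl, hx']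
      rw [habs]
      simp

theorem buildRunsRev_runsC (rest : List String) :
    buildRunsRev rest [] = (runsC rest).reverse := by
  cases rest with
  | nil => rfl
  | cons x rest =>
    simp only [buildRunsRev, runsC]
    rw [buildRunsRev_absorb]
    cases hr : runsC rest with
    | nil => simp [absorb]
    | cons p tl' =>
      obtain ⟨l', m⟩ := p
      by_cases hl : l' = x <;> simp [absorb, hl]

theorem runsC_head (y : String) (ys : List String) :
    ∃ m tl, runsC (y :: ys) = (y, m) :: tl := by
  simp only [runsC]
  cases runsC ys with
  | nil => exact ⟨1, [], rfl⟩
  | cons p tl' =>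
    obtain ⟨l', m⟩ := p
    by_cases hl : l' = y <;> simp [absorb, hl]

theorem runsC_decomp (lab : String) (ys : List String) :
    runsC (lab :: ys) = (lab, 1 + leadCount lab ys) :: runsC (ys.drop (leadCount lab ys)) := by
  induction ys with
  | nil => simp [runsC, absorb, leadCount]
  | cons y ys ih =>
    by_cases hy : y = lab
    · subst hy
      have hlc : leadCount y (y :: ys) = 1 + leadCount y ys := by
        simp [leadCount, List.takeWhile]; omega
      rw [hlc]
      have h0 : runsC (y :: y :: ys) = absorb y 1 (runsC (y :: ys)) := rfl
      have hdrop : List.drop (1 + leadCount y ys) (y :: ys) = List.drop (leadCount y ys) ys := by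
        rw [Nat.add_comm]; rfl
      rw [h0, ih]
      simp [absorb, hdrop]
    · have hb : (y == lab) = false := by simp [hy]
      have hlc : leadCount lab (y :: ys) = 0 := by
        simp [leadCount, List.takeWhile, hb]
      rw [hlc]
      obtain ⟨m, tl, htl⟩ := runsC_head y ys
      have h0 : runsC (lab :: y :: ys) = absorb lab 1 (runsC (y :: ys)) := rfl
      rw [h0, htl]
      simp only [absorb]
      rw [if_neg hy, ← htl]
      simp

theorem findRunEnd_eq (xs : List String) (lab : String) (e : Nat) :
    findRunEnd xs lab e = e + leadCount lab (xs.drop e) := by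
  fun_induction findRunEnd with
  | case1 e h heq ih =>
    have hd : xs.drop e = xs.getD e "" :: xs.drop (e + 1) := by
      rw [List.getD_eq_getElem _ _ h]
      exact List.drop_eq_getElem_cons h
    rw [ih, hd]
    simp only [leadCount, List.takeWhile, heq]
    simp; omega
  | case2 e h heq =>
    have hd : xs.drop e = xs.getD e "" :: xs.drop (e + 1) := by
      rw [List.getD_eq_getElem _ _ h]
      exact List.drop_eq_getElem_cons h
    rw [hd]
    rw [Bool.not_eq_true] at heq
    simp only [leadCount, List.takeWhile, heq]
    simp
  | case3 e h =>
    rw [List.drop_eq_nil_of_le (by omega)]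
    simp [leadCount]

theorem leadCount_le (lab : String) (ys : List String) : leadCount lab ys ≤ ys.length := by
  induction ys with
  | nil => simp [leadCount]
  | cons y t ih =>
    simp only [leadCount, List.takeWhile] at *
    cases y == lab <;> simp <;> omega

theorem leadCount_getD (lab : String) (ys : List String) :
    ∀ i, i < leadCount lab ys → ys.getD i "" = lab := by
  induction ys with
  | nil => simp [leadCount]
  | cons y t ih =>
    intro i hi
    simp only [leadCount, List.takeWhile] at hi
    cases hb : (y == lab) with
    | false => rw [hb] at hi; simp at hi
    | true =>
      rw [hb] at hi
      simp only [List.length_cons] at hi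
      cases i with
      | zero => simpa using (beq_iff_eq.mp hb)
      | succ j => exact ih j (by simpa [leadCount] using Nat.lt_of_succ_lt_succ hi)

theorem take_leadCount (lab : String) (ys : List String) :
    ys.take (leadCount lab ys) = List.replicate (leadCount lab ys) lab := by
  induction ys with
  | nil => simp [leadCount]
  | cons y t ih =>
    cases hb : (y == lab) with
    | false => simp [leadCount, List.takeWhile, hb]
    | true =>
      have hy : y = lab := beq_iff_eq.mp hb
      have hlc : leadCount lab (y :: t) = leadCount lab t + 1 := by
        simp [leadCount, List.takeWhile, hb]
      rw [hlc, List.take_succ_cons, List.replicate_succ, ih, hy]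

theorem setRange_eq (v : String) : ∀ (n : Nat) (xs : List String) (s : Nat), s + n ≤ xs.length →
    setRange xs s n v = xs.take s ++ List.replicate n v ++ xs.drop (s + n) := by
  intro n
  induction n with
  | zero => intro xs s h; simp [setRange]
  | succ m ih =>
    intro xs s h
    have hs : s < xs.length := by omega
    have hstep : setRange xs s (m + 1) v = setRange (xs.set s v) (s + 1) m v := rfl
    rw [hstep, ih (xs.set s v) (s + 1) (by simp; omega)]
    have hset : xs.set s v = (xs.take s ++ [v]) ++ xs.drop (s + 1) := by
      rw [List.set_eq_take_append_cons_drop, if_pos hs]; simp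
    have hlen : (xs.take s ++ [v]).length = s + 1 := by simp; omega
    rw [hset, List.take_left' hlen,
      show s + 1 + m = (xs.take s ++ [v]).length + m by omega,
      List.drop_length_add_append]
    simp [List.replicate_succ]
    omega

theorem loopA_expand (mx : Int) : ∀ (k : Nat) (xs : List String) (s : Nat),
    xs.length - s ≤ k → s ≤ xs.length →
    loopA mx xs s = xs.take s ++ expandRuns mx (runsC (xs.drop s))
      (if s = 0 then none else some (xs.getD (s - 1) "")) := by
  intro k
  induction k with
  | zero =>
    intro xs s hk hs
    have he : s = xs.length := by omega
    rw [loopA, dif_neg (by omega)]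
    rw [List.take_of_length_le (by omega), List.drop_eq_nil_of_le (by omega)]
    simp [runsC, expandRuns]
  | succ k ih =>
    intro xs s hk hs
    by_cases h : s < xs.length
    · rw [loopA, dif_pos h]
      generalize hlabeq : xs.getD s "" = lab
      generalize hk'eq : leadCount lab (xs.drop (s + 1)) = k'
      have hE : findRunEnd xs lab (s + 1) = s + 1 + k' := by
        rw [findRunEnd_eq, hk'eq]
      have hk'le : k' ≤ xs.length - (s + 1) := by
        rw [← hk'eq]
        have := leadCount_le lab (xs.drop (s + 1))
        simpa using this
      have hle : s + 1 + k' ≤ xs.length := by omega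
      have hdropS : xs.drop s = lab :: xs.drop (s + 1) := by
        rw [← hlabeq, List.getD_eq_getElem _ _ h]
        exact List.drop_eq_getElem_cons h
      have hruns : runsC (xs.drop s) = (lab, 1 + k') :: runsC (xs.drop (s + 1 + k')) := by
        rw [hdropS, runsC_decomp, hk'eq]
        congr 1
        rw [List.drop_drop]
      have hright : (runsC (xs.drop (s + 1 + k'))).head?.map Prod.fst =
          (if s + 1 + k' < xs.length then some (xs.getD (s + 1 + k') "") else none) := by
        by_cases he : s + 1 + k' < xs.length
        · rw [if_pos he]
          have : xs.drop (s + 1 + k') = xs.getD (s + 1 + k') "" :: xs.drop (s + 1 + k' + 1) := by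
            rw [List.getD_eq_getElem _ _ he]
            exact List.drop_eq_getElem_cons he
          rw [this]
          obtain ⟨m, tl, htl⟩ := runsC_head (xs.getD (s + 1 + k') "") (xs.drop (s + 1 + k' + 1))
          rw [htl]; rfl
        · rw [if_neg he, List.drop_eq_nil_of_le (by omega)]
          rfl
      have hprev : (if s = 0 then (none : Option String) else some (xs.getD (s - 1) "")) =
          (if s > 0 then some (xs.getD (s - 1) "") else none) := by
        cases s <;> simp
      have hdec : (((s + 1 + k' : Nat) : Int) - ((s : Nat) : Int) ≤ mx) = (((1 + k' : Nat) : Int) ≤ mx) := by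
        have : ((s + 1 + k' : Nat) : Int) - ((s : Nat) : Int) = ((1 + k' : Nat) : Int) := by
          push_cast; ring
        rw [this]
      simp only [hE, hruns, expandRuns, hright, hprev, hdec]
      set left : Option String := if s > 0 then some (xs.getD (s - 1) "") else none with hleft
      by_cases hc : ((lab != "silence" && decide (((1 + k' : Nat) : Int) ≤ mx) &&
          left.isSome && (left == if s + 1 + k' < xs.length then some (xs.getD (s + 1 + k') "") else none) &&
          left != some "silence") = true)
      · -- the run is relabeled to the left neighbour
        rw [if_pos hc, if_pos hc]
        have hs0 : 0 < s := by
          rcases Nat.eq_zero_or_pos s with h0 | h0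
          · rw [hleft, h0] at hc; simp at hc
          · exact h0
        have hleft' : left = some (xs.getD (s - 1) "") := by rw [hleft, if_pos hs0]
        have hn : s + 1 + k' - s = 1 + k' := by omega
        have hsr : setRange xs s (s + 1 + k' - s) (left.getD "") =
            xs.take s ++ List.replicate (1 + k') (left.getD "") ++ xs.drop (s + 1 + k') := by
          rw [hn, setRange_eq _ _ _ _ (by omega)]
          congr 2
          omega
        have hlenA : (xs.take s ++ List.replicate (1 + k') (left.getD "")).length = s + 1 + k' := by
          simp; omega
        have hlen' : (setRange xs s (s + 1 + k' - s) (left.getD "")).length = xs.length := by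
          rw [setRange_length]
        rw [ih _ (s + 1 + k') (by rw [hlen']; omega) (by rw [hlen']; omega)]
        rw [hsr, List.take_left' hlenA, List.drop_left' hlenA]
        have hgd : ((xs.take s ++ List.replicate (1 + k') (left.getD "")) ++ xs.drop (s + 1 + k')).getD
            (s + 1 + k' - 1) "" = left.getD "" := by
          have hidx : s + 1 + k' - 1 < (xs.take s ++ List.replicate (1 + k') (left.getD "")).length := by omega
          rw [List.getD_eq_getElem _ _ (by simp; omega), List.getElem_append_left hidx,
            List.getElem_append_right (by simp [hlenA] at hidx ⊢)]
          simp
        rw [if_neg (show ¬(s + 1 + k' = 0) by omega), hgd, hleft']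
        simp [List.append_assoc]
      · -- the run is kept as is
        rw [if_neg hc, if_neg hc]
        rw [ih xs (s + 1 + k') (by omega) (by omega)]
        have hgd : xs.getD (s + 1 + k' - 1) "" = lab := by
          cases hk0 : k' with
          | zero =>
            rw [show s + 1 + 0 - 1 = s by omega]
            exact hlabeq
          | succ j =>
            have hj : j < leadCount lab (xs.drop (s + 1)) := by rw [hk'eq, hk0]; omega
            have hv := leadCount_getD lab (xs.drop (s + 1)) j hj
            rw [List.getD_eq_getElem _ _ (by simp; omega)] at hv ⊢
            rw [List.getElem_drop] at hv
            simp only [show s + 1 + (j + 1) - 1 = s + 1 + j from by omega]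
            exact hv
        rw [if_neg (show ¬(s + 1 + k' = 0) by omega), hgd]
        have htake : xs.take (s + 1 + k') = xs.take s ++ List.replicate (1 + k') lab := by
          rw [show s + 1 + k' = s + (1 + k') by omega, List.take_add, hdropS]
          congr 1
          have h2 : (xs.drop (s + 1)).take k' = List.replicate k' lab := by
            rw [← hk'eq, take_leadCount]
          rw [show 1 + k' = k' + 1 by omega, List.take_succ_cons, h2, List.replicate_succ]
        rw [htake]
        simp [List.append_assoc]
    · have he : s = xs.length := by omega
      rw [loopA, dif_neg (by omega)]
      rw [List.take_of_length_le (by omega), List.drop_eq_nil_of_le (by omega)]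
      simp [runsC, expandRuns]

-- ===== VERDICT (by name: the statement is the Claim_ definition above) =====
theorem merge_short_middle_non_silence_runs_spec : Claim_equal_merge_short_middle_non_silence_runs := by
  intro labels max_run_length _
  unfold Spec_merge_short_middle_non_silence_runs
  unfold merge_short_middle_non_silence_runs merge_short_middle_non_silence_runs_alt
  split
  · rfl
  · rw [loopA_expand max_run_length labels.length labels 0 (by omega) (Nat.zero_le _),
      buildRunsRev_runsC, List.reverse_reverse]
    simp
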